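-- pv_equiv track=rewrite | github.com/anveshreddyakkati/Competetive-Programming---Elective-3 | quiz.py | bestQuiz
-- ===== SOURCE A (Python) =====
-- def bestQuiz(l):
--
--       c=0
--       z=0
--
--       results =[]
--
--
--       for i in range (len(l[0])):
--             d=0
--             Range=0
--             count=0
--             for j in range (len(l)):
--                   if l[j][i]==-1:
--                         count+=0
--
--                         Range+=-1
--                   else:
--                         count+=l[j][i]
--                         Range+=1
--             if Range<=0:
--                   d=count
--             else:
--                   d=count//Range
--             results.append(d)
--       x=max(results)
--
--       if x!=0:
--           return results.index(x)
--       return None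
-- ===== SOURCE B (Python) =====
-- def bestQuiz(l):
--     n = len(l[0])
--     acc = [(0, 0)] * n
--     for row in l:
--         acc = [(c, r - 1) if row[i] == -1 else (c + row[i], r + 1)
--                for i, (c, r) in enumerate(acc)]
--     best, best_i = None, 0
--     for i, (c, r) in enumerate(acc):
--         d = c if r <= 0 else c // r
--         if best is None or best < d:
--             best, best_i = d, i
--     return best_i if best else None
-- ===== Notes on version B (the rewrite author's own statement) =====
-- stated objective: alternative
-- what changed: B inverts the loop nesting: one row-major pass maintaining a per-column (count, range) accumulator list, then a single left-to-right argmax scan replacing A's column-by-column rescans plus max()+list.index().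
import Mathlib
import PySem

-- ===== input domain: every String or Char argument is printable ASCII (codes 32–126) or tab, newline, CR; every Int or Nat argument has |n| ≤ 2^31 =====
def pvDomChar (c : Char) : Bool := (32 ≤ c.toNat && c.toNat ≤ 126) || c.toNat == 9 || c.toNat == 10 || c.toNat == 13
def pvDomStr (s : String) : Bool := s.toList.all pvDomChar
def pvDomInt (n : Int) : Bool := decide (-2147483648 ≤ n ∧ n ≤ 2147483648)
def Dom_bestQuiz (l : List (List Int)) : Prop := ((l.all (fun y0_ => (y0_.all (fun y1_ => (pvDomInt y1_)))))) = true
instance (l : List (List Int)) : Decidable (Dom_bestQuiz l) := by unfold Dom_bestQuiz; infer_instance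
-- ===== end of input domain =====

-- B replaces A's column-by-column scans + max()+index() by one row-major pass over
-- per-column accumulators and a single argmax scan (alternative decomposition, same cost).
-- ===== PORT A =====
def bestQuiz (l : List (List Int)) : Option Int :=
  let results : List Int :=
    (PySem.List.pyRange 0 ((PySem.List.pyGetD l 0 []).length : Int) 1).map (fun i =>
      let cr :=
        (PySem.List.pyRange 0 (l.length : Int) 1).foldl
          (fun (cr : Int × Int) j =>
            if PySem.List.pyGetD (PySem.List.pyGetD l j []) i 0 = -1 then
              (cr.1 + 0, cr.2 + (-1))
            else
              (cr.1 + PySem.List.pyGetD (PySem.List.pyGetD l j []) i 0, cr.2 + 1))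
          (0, 0)
      if cr.2 ≤ 0 then cr.1 else PySem.Int.floordiv cr.1 cr.2)
  match PySem.List.max? results (fun y => y) with
  | none => none
  | some x => if x ≠ 0 then (PySem.List.index? results x).map (fun k => (k : Int)) else none

-- ===== PORT B =====
def bestQuiz_alt (l : List (List Int)) : Option Int :=
  let n := (PySem.List.pyGetD l 0 []).length
  let acc : List (Int × Int) :=
    l.foldl
      (fun (acc : List (Int × Int)) row =>
        (PySem.List.enumerate acc 0).map (fun p =>
          if PySem.List.pyGetD row p.1 0 = -1 then (p.2.1, p.2.2 - 1)
          else (p.2.1 + PySem.List.pyGetD row p.1 0, p.2.2 + 1)))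
      (List.replicate n (0, 0))
  let st :=
    (PySem.List.enumerate acc 0).foldl
      (fun (st : Option Int × Int) (p : Int × (Int × Int)) =>
        let d := if p.2.2 ≤ 0 then p.2.1 else PySem.Int.floordiv p.2.1 p.2.2
        match st.1 with
        | none => (some d, p.1)
        | some b => if b < d then (some d, p.1) else st)
      ((none, 0) : Option Int × Int)
  match st.1 with
  | none => none
  | some b => if b = 0 then none else some st.2

-- ===== PRECONDITION & SPEC =====
-- Pre_ excludes exactly the inputs where the Python A raises: empty l (IndexError on l[0]),
-- an empty first row (ValueError from max([])), and rows shorter than len(l[0]) (IndexError).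
def Pre_bestQuiz (l : List (List Int)) : Prop :=
  0 < l.length ∧ 0 < (l.headD []).length ∧ ∀ row ∈ l, (l.headD []).length ≤ row.length
instance (l : List (List Int)) : Decidable (Pre_bestQuiz l) := by unfold Pre_bestQuiz; infer_instance
def pvWitness_bestQuiz : List (List Int) := [[1, 2], [3, -1]]

def Spec_bestQuiz (l : List (List Int)) (out : Option Int) : Prop := out = bestQuiz_alt l
instance (l : List (List Int)) (out : Option Int) : Decidable (Spec_bestQuiz l out) := by unfold Spec_bestQuiz; infer_instance

-- ===== CLAIM (what is proved, stated in full; the proofs are below) =====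
def Claim_equal_bestQuiz : Prop := ∀ (l : List (List Int)), Dom_bestQuiz l → Pre_bestQuiz l → Spec_bestQuiz l (bestQuiz l)


-- ===== LEMMAS AND PROOFS =====

-- helper definitions used only by the proofs
def pvStepCol (i : Int) (cr : Int × Int) (row : List Int) : Int × Int :=
  if PySem.List.pyGetD row i 0 = -1 then (cr.1, cr.2 - 1)
  else (cr.1 + PySem.List.pyGetD row i 0, cr.2 + 1)

def pvFin (cr : Int × Int) : Int := if cr.2 ≤ 0 then cr.1 else PySem.Int.floordiv cr.1 cr.2

def pvArg (st : Option Int × Int) (i d : Int) : Option Int × Int :=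
  match st.1 with
  | none => (some d, i)
  | some b => if b < d then (some d, i) else st

def pvResults (l : List (List Int)) : List Int :=
  (List.range (PySem.List.pyGetD l 0 []).length).map
    (fun (k : Nat) => pvFin (l.foldl (pvStepCol (k : Int)) (0, 0)))

def pvEndA (res : List Int) : Option Int :=
  match PySem.List.max? res (fun y => y) with
  | none => none
  | some x => if x ≠ 0 then (PySem.List.index? res x).map (fun k => (k : Int)) else none

def pvEnd (st : Option Int × Int) : Option Int :=
  match st.1 with
  | none => none
  | some b => if b = 0 then none else some st.2

lemma pv_enum_map_range {α : Type} (g : Nat → α) (n : Nat) :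
    PySem.List.enumerate ((List.range n).map g) 0
      = (List.range n).map (fun (k : Nat) => ((k : Int), g k)) := by
  induction n with
  | zero => simp [PySem.List.enumerate_nil]
  | succ n ih =>
    simp [List.range_succ, PySem.List.enumerate_append, PySem.List.enumerate_cons,
      PySem.List.enumerate_nil, ih]

lemma pv_rep (n : Nat) :
    List.replicate n ((0, 0) : Int × Int) = (List.range n).map (fun _ => ((0, 0) : Int × Int)) := by
  symm
  rw [List.map_const', List.length_range]

lemma pv_colA (l : List (List Int)) (i : Int) :
    List.foldl
      (fun (cr : Int × Int) j =>
        if PySem.List.pyGetD (PySem.List.pyGetD l j []) i 0 = -1 then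
          (cr.1 + 0, cr.2 + (-1))
        else
          (cr.1 + PySem.List.pyGetD (PySem.List.pyGetD l j []) i 0, cr.2 + 1))
      (0, 0) (PySem.List.pyRange 0 (l.length : Int) 1)
    = l.foldl (pvStepCol i) (0, 0) := by
  have h := PySem.List.foldl_pyRange_zero_pyGetD' l [] (pvStepCol i) ((0, 0) : Int × Int)
  rw [← h]
  congr 1
  funext cr j
  simp [pvStepCol, sub_eq_add_neg]

lemma pv_resultsA_eq (l : List (List Int)) :
    ((PySem.List.pyRange 0 ((PySem.List.pyGetD l 0 []).length : Int) 1).map (fun i =>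
      let cr :=
        (PySem.List.pyRange 0 (l.length : Int) 1).foldl
          (fun (cr : Int × Int) j =>
            if PySem.List.pyGetD (PySem.List.pyGetD l j []) i 0 = -1 then
              (cr.1 + 0, cr.2 + (-1))
            else
              (cr.1 + PySem.List.pyGetD (PySem.List.pyGetD l j []) i 0, cr.2 + 1))
          (0, 0)
      if cr.2 ≤ 0 then cr.1 else PySem.Int.floordiv cr.1 cr.2))
    = pvResults l := by
  rw [PySem.List.pyRange_zero_nat (PySem.List.pyGetD l 0 []).length, List.map_map]
  refine List.map_congr_left (fun k _ => ?_)
  simp only [Function.comp_apply]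
  rw [pv_colA]
  simp [pvFin]

lemma pv_acc_inv (l : List (List Int)) : ∀ (n : Nat) (g : Nat → Int × Int),
    List.foldl
      (fun (acc : List (Int × Int)) row =>
        (PySem.List.enumerate acc 0).map (fun p =>
          if PySem.List.pyGetD row p.1 0 = -1 then (p.2.1, p.2.2 - 1)
          else (p.2.1 + PySem.List.pyGetD row p.1 0, p.2.2 + 1)))
      ((List.range n).map g) l
    = (List.range n).map (fun (k : Nat) => List.foldl (pvStepCol (k : Int)) (g k) l) := by
  induction l with
  | nil => intro n g; simp
  | cons row l ih =>
    intro n g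
    simp only [List.foldl_cons]
    rw [pv_enum_map_range, List.map_map, ih]
    refine List.map_congr_left (fun k _ => ?_)
    simp [pvStepCol, Function.comp]

lemma pv_fold_fin (n : Nat) (fv : Nat → Int × Int) (init : Option Int × Int) :
    (PySem.List.enumerate ((List.range n).map fv) 0).foldl
      (fun (st : Option Int × Int) (p : Int × (Int × Int)) =>
        let d := if p.2.2 ≤ 0 then p.2.1 else PySem.Int.floordiv p.2.1 p.2.2
        match st.1 with
        | none => (some d, p.1)
        | some b => if b < d then (some d, p.1) else st)
      init
    = (PySem.List.enumerate ((List.range n).map (fun k => pvFin (fv k))) 0).foldl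
        (fun st p => pvArg st p.1 p.2) init := by
  rw [pv_enum_map_range, pv_enum_map_range, List.foldl_map, List.foldl_map]
  rfl

lemma pv_argmax : ∀ (ds : List Int), ds ≠ [] →
    ∃ M k, PySem.List.max? ds (fun y => y) = some M ∧
      PySem.List.index? ds M = some k ∧
      (PySem.List.enumerate ds 0).foldl (fun st p => pvArg st p.1 p.2)
        ((none, 0) : Option Int × Int) = (some M, (k : Int)) := by
  intro ds
  induction ds using List.reverseRecOn with
  | nil => intro h; exact absurd rfl h
  | append_singleton p d ih =>
    intro _
    rcases eq_or_ne p [] with rfl | hp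
    · refine ⟨d, 0, ?_, ?_, ?_⟩
      · simp [PySem.List.max?_id_cons]
      · simp
      · simp [PySem.List.enumerate_cons, PySem.List.enumerate_nil, pvArg]
    · obtain ⟨M, k, hmax, hidx, hfold⟩ := ih hp
      obtain ⟨x, t, rfl⟩ := List.exists_cons_of_ne_nil hp
      have hM : t.foldl max x = M := by
        have h := hmax
        rw [PySem.List.max?_id_cons] at h
        exact Option.some.inj h
      have hmax' : PySem.List.max? ((x :: t) ++ [d]) (fun y => y) = some (max M d) := by
        rw [List.cons_append, PySem.List.max?_id_cons, List.foldl_append]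
        simp [hM]
      have hfold' : (PySem.List.enumerate ((x :: t) ++ [d]) 0).foldl
            (fun st p => pvArg st p.1 p.2) ((none, 0) : Option Int × Int)
          = pvArg (some M, (k : Int)) ((x :: t).length : Int) d := by
        rw [PySem.List.enumerate_append, List.foldl_append, hfold,
          PySem.List.enumerate_cons, PySem.List.enumerate_nil]
        simp
      by_cases hlt : M < d
      · have hd : d ∉ x :: t := fun hmem =>
          absurd (PySem.List.max?_isMax hmax d hmem) (by omega)
        refine ⟨d, (x :: t).length, ?_, ?_, ?_⟩
        · rw [hmax', max_eq_right hlt.le]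
        · exact PySem.List.index?_append_singleton_self _ d hd
        · rw [hfold']
          simp [pvArg, hlt]
      · have hMd : max M d = M := max_eq_left (not_lt.mp hlt)
        refine ⟨M, k, by rw [hmax', hMd], ?_, ?_⟩
        · rw [PySem.List.index?_append_of_mem _ (PySem.List.max?_mem hmax)]
          exact hidx
        · rw [hfold']
          simp [pvArg, hlt]

lemma pv_main (res : List Int) :
    pvEndA res
      = pvEnd ((PySem.List.enumerate res 0).foldl (fun st p => pvArg st p.1 p.2)
          ((none, 0) : Option Int × Int)) := by
  rcases eq_or_ne res [] with rfl | hne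
  · rfl
  · obtain ⟨M, k, hmax, hidx, hfold⟩ := pv_argmax res hne
    simp only [pvEndA, pvEnd, hmax, hidx, hfold]
    by_cases hM : M = 0 <;> simp [hM]

lemma pv_A_eq (l : List (List Int)) : bestQuiz l = pvEndA (pvResults l) := by
  have e1 : bestQuiz l = pvEndA
      ((PySem.List.pyRange 0 ((PySem.List.pyGetD l 0 []).length : Int) 1).map (fun i =>
        let cr :=
          (PySem.List.pyRange 0 (l.length : Int) 1).foldl
            (fun (cr : Int × Int) j =>
              if PySem.List.pyGetD (PySem.List.pyGetD l j []) i 0 = -1 then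
                (cr.1 + 0, cr.2 + (-1))
              else
                (cr.1 + PySem.List.pyGetD (PySem.List.pyGetD l j []) i 0, cr.2 + 1))
            (0, 0)
        if cr.2 ≤ 0 then cr.1 else PySem.Int.floordiv cr.1 cr.2)) := rfl
  rw [e1, pv_resultsA_eq]

lemma pv_B_eq (l : List (List Int)) :
    bestQuiz_alt l
      = pvEnd ((PySem.List.enumerate (pvResults l) 0).foldl (fun st p => pvArg st p.1 p.2)
          ((none, 0) : Option Int × Int)) := by
  have e1 : bestQuiz_alt l = pvEnd
      ((PySem.List.enumerate
          (List.foldl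
            (fun (acc : List (Int × Int)) row =>
              (PySem.List.enumerate acc 0).map (fun p =>
                if PySem.List.pyGetD row p.1 0 = -1 then (p.2.1, p.2.2 - 1)
                else (p.2.1 + PySem.List.pyGetD row p.1 0, p.2.2 + 1)))
            (List.replicate (PySem.List.pyGetD l 0 []).length ((0, 0) : Int × Int)) l) 0).foldl
        (fun (st : Option Int × Int) (p : Int × (Int × Int)) =>
          let d := if p.2.2 ≤ 0 then p.2.1 else PySem.Int.floordiv p.2.1 p.2.2
          match st.1 with
          | none => (some d, p.1)
          | some b => if b < d then (some d, p.1) else st)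
        ((none, 0) : Option Int × Int)) := rfl
  rw [e1, pv_rep, pv_acc_inv, pv_fold_fin]
  rfl

theorem bestQuiz_spec_total (l : List (List Int)) : bestQuiz l = bestQuiz_alt l := by
  rw [pv_A_eq, pv_B_eq, pv_main]

-- ===== VERDICT (by name: the statement is the Claim_ definition above) =====
theorem bestQuiz_spec : Claim_equal_bestQuiz := by
  intro l _ _
  exact bestQuiz_spec_total l
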